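-- pv_equiv track=rewrite | github.com/satisfice/AI_Experiments | experiments/AIOutputFormat/summarize.py | detect_case
-- ===== SOURCE A (Python) =====
-- def detect_case(items):
--     """
--     Detect the case pattern of items (before lowercasing).
--     Returns (case, consistent) where:
--     - case: "upper", "lower", or "mixed"
--     - consistent: true if all items have same case, false if mixed
--     """
--     if not items:
--         return "lower", True
--
--     # Collect case info for items that have alphabetic characters
--     item_cases = []
--     for item in items:
--         item_str = str(item)
--         # Skip items with no alphabetic characters
--         if not any(c.isalpha() for c in item_str):
--             continue
--
--         if item_str.isupper():
--             item_cases.append("upper")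
--         elif item_str.islower():
--             item_cases.append("lower")
--         else:
--             item_cases.append("mixed")
--
--     if not item_cases:
--         return "lower", True
--
--     # Check consistency
--     unique_cases = set(item_cases)
--
--     if "mixed" in unique_cases:
--         return "mixed", False
--     elif len(unique_cases) == 1:
--         return unique_cases.pop(), True
--     else:
--         return "mixed", False
-- ===== SOURCE B (Python) =====
-- def detect_case(items):
--     """
--     Detect the case pattern of items (before lowercasing).
--     Single pass with boolean flags instead of building a list of
--     per-item labels and a set: classify each item by whether it
--     contains upper/lower letters, bail out as soon as one item mixes
--     cases, and combine the flags at the end.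
--     """
--     seen_upper = False
--     seen_lower = False
--     for item in items:
--         s = str(item)
--         has_upper = any(c.isupper() for c in s)
--         has_lower = any(c.islower() for c in s)
--         if has_upper and has_lower:
--             return "mixed", False
--         if has_upper:
--             seen_upper = True
--         elif has_lower:
--             seen_lower = True
--     if seen_upper and seen_lower:
--         return "mixed", False
--     if seen_upper:
--         return "upper", True
--     return "lower", True
-- ===== Notes on version B (the rewrite author's own statement) =====
-- stated objective: simpler
-- what changed: Replaced the two-phase build-a-label-list-then-set-analysis (and the per-item isupper/islower string predicates) with a single pass that derives each item's class from two char-level flags (has_upper/has_lower), returns 'mixed' immediately when one item mixes cases, and combines two seen-flags at the end.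
import Mathlib
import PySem

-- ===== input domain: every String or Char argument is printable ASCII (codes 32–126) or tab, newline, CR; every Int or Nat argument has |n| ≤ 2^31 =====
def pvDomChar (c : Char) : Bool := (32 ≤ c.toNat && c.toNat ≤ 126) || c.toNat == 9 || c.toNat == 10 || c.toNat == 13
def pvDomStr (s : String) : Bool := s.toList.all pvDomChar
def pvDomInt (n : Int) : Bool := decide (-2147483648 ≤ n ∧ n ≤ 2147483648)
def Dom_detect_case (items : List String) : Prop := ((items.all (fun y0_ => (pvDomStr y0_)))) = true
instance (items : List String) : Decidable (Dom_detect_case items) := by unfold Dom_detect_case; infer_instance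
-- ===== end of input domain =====

-- B replaces A's build-a-label-list-then-set-analysis by a single pass with two seen-flags and an
-- early return on a case-mixing item (objective: simpler; same exact result).


-- ===== PORT A =====
-- hand port of Python str.isupper(): at least one cased char and no lowercase one
-- (exact on the ASCII domain, where the cased characters are exactly A-Z and a-z)
def pyStrIsupper (cs : List Char) : Bool :=
  cs.any PySem.Chars.isupper && !(cs.any PySem.Chars.islower)

-- hand port of Python str.islower(), same remark
def pyStrIslower (cs : List Char) : Bool :=
  cs.any PySem.Chars.islower && !(cs.any PySem.Chars.isupper)

-- loop body of A's first pass (one item: skip, or append its label)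
def pvAStep (acc : List String) (item : String) : List String :=
  -- item_str = str(item) is the identity on strings; written item.toList inline
  if !(item.toList.any PySem.Chars.isalpha) then acc       -- continue
  else if pyStrIsupper item.toList then acc ++ ["upper"]
  else if pyStrIslower item.toList then acc ++ ["lower"]
  else acc ++ ["mixed"]

def detect_case (items : List String) : String × Bool :=
  if items = [] then ("lower", true)
  else
    let item_cases := items.foldl pvAStep ([] : List String)
    if item_cases = [] then ("lower", true)
    else
      let unique_cases := PySem.Set.ofList item_cases
      if unique_cases.contains "mixed" then ("mixed", false)
      else if unique_cases.length = 1 then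
        -- set.pop(): taken only when the set has exactly one element, so it is that element
        (unique_cases.headD "", true)
      else ("mixed", false)

-- ===== PORT B =====
def detect_case_alt_go : List String → Bool → Bool → String × Bool
  | [], seen_upper, seen_lower =>
    if seen_upper && seen_lower then ("mixed", false)
    else if seen_upper then ("upper", true)
    else ("lower", true)
  | item :: rest, seen_upper, seen_lower =>
    -- s = str(item) is the identity on strings; has_upper / has_lower written inline
    if item.toList.any PySem.Chars.isupper && item.toList.any PySem.Chars.islower then
      ("mixed", false)
    else if item.toList.any PySem.Chars.isupper then detect_case_alt_go rest true seen_lower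
    else if item.toList.any PySem.Chars.islower then detect_case_alt_go rest seen_upper true
    else detect_case_alt_go rest seen_upper seen_lower

def detect_case_alt (items : List String) : String × Bool :=
  detect_case_alt_go items false false

-- ===== PRECONDITION & SPEC =====
def Spec_detect_case (items : List String) (out : String × Bool) : Prop := out = detect_case_alt items
instance (items : List String) (out : String × Bool) : Decidable (Spec_detect_case items out) := by unfold Spec_detect_case; infer_instance

-- ===== CLAIM (what is proved, stated in full; the proofs are below) =====
def Claim_equal_detect_case : Prop := ∀ (items : List String), Dom_detect_case items → Spec_detect_case items (detect_case items)

-- ===== LEMMAS AND PROOFS =====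

-- per-item label (what A appends for one item, none = skipped)
def pvCls (item : String) : Option String :=
  if !(item.toList.any PySem.Chars.isalpha) then none
  else if pyStrIsupper item.toList then some "upper"
  else if pyStrIslower item.toList then some "lower"
  else some "mixed"

-- any(c.isalpha()) splits into the two char-class flags
theorem pvAny_alpha (cs : List Char) :
    cs.any PySem.Chars.isalpha
      = (cs.any PySem.Chars.isupper || cs.any PySem.Chars.islower) := by
  induction cs with
  | nil => rfl
  | cons c t ih =>
    simp only [List.any_cons, ih, PySem.Chars.isalpha]
    cases PySem.Chars.isupper c <;> cases PySem.Chars.islower c <;> simp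

-- pvCls rewritten through the two flags
theorem pvCls_eq (x : String) :
    pvCls x =
      (if x.toList.any PySem.Chars.isupper then
        (if x.toList.any PySem.Chars.islower then some "mixed" else some "upper")
      else
        (if x.toList.any PySem.Chars.islower then some "lower" else none)) := by
  unfold pvCls pyStrIsupper pyStrIslower
  rw [pvAny_alpha]
  by_cases hu : x.toList.any PySem.Chars.isupper <;>
    by_cases hl : x.toList.any PySem.Chars.islower <;> simp [hu, hl]

theorem pvAStep_eq (acc : List String) (x : String) :
    pvAStep acc x = acc ++ (pvCls x).toList := by
  unfold pvAStep pvCls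
  split_ifs <;> simp

theorem pvFoldl_eq_filterMap (items : List String) (acc : List String) :
    items.foldl pvAStep acc = acc ++ items.filterMap pvCls := by
  induction items generalizing acc with
  | nil => simp
  | cons x xs ih =>
    simp only [List.foldl_cons, List.filterMap_cons, pvAStep_eq, ih]
    cases pvCls x <;> simp

-- the three presence flags B tracks
def pvHasMixed (items : List String) : Bool :=
  items.any (fun s => s.toList.any PySem.Chars.isupper && s.toList.any PySem.Chars.islower)
def pvHasUp (items : List String) : Bool :=
  items.any (fun s => s.toList.any PySem.Chars.isupper && !(s.toList.any PySem.Chars.islower))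
def pvHasLo (items : List String) : Bool :=
  items.any (fun s => s.toList.any PySem.Chars.islower && !(s.toList.any PySem.Chars.isupper))

def pvFin (su sl : Bool) : String × Bool :=
  if su && sl then ("mixed", false)
  else if su then ("upper", true)
  else ("lower", true)

theorem pvGo_spec (items : List String) (su sl : Bool) :
    detect_case_alt_go items su sl =
      if pvHasMixed items then ("mixed", false)
      else pvFin (su || pvHasUp items) (sl || pvHasLo items) := by
  induction items generalizing su sl with
  | nil => simp [detect_case_alt_go, pvHasMixed, pvHasUp, pvHasLo, pvFin]
  | cons x xs ih =>
    simp only [detect_case_alt_go, pvHasMixed, pvHasUp, pvHasLo, List.any_cons]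
    by_cases hu : x.toList.any PySem.Chars.isupper <;>
      by_cases hl : x.toList.any PySem.Chars.islower <;>
        simp [hu, hl, ih, pvHasMixed, pvHasUp, pvHasLo]

-- membership in A's label list ↔ the flags
theorem pvMem_filterMap (items : List String) :
    ("mixed" ∈ items.filterMap pvCls ↔ pvHasMixed items = true) ∧
    ("upper" ∈ items.filterMap pvCls ↔ pvHasUp items = true) ∧
    ("lower" ∈ items.filterMap pvCls ↔ pvHasLo items = true) := by
  induction items with
  | nil => simp [pvHasMixed, pvHasUp, pvHasLo]
  | cons x xs ih =>
    obtain ⟨ihm, ihu, ihl⟩ := ih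
    by_cases hu : x.toList.any PySem.Chars.isupper = true <;>
      by_cases hl : x.toList.any PySem.Chars.islower = true
    · have hx : pvCls x = some "mixed" := by rw [pvCls_eq]; simp [hu, hl]
      refine ⟨?_, ?_, ?_⟩ <;>
        simp [hx, pvHasMixed, pvHasUp, pvHasLo, hu, hl, ihm, ihu, ihl]
    · have hx : pvCls x = some "upper" := by rw [pvCls_eq]; simp [hu, hl]
      refine ⟨?_, ?_, ?_⟩ <;>
        simp [hx, pvHasMixed, pvHasUp, pvHasLo, hu, hl, ihm, ihu, ihl]
    · have hx : pvCls x = some "lower" := by rw [pvCls_eq]; simp [hu, hl]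
      refine ⟨?_, ?_, ?_⟩ <;>
        simp [hx, pvHasMixed, pvHasUp, pvHasLo, hu, hl, ihm, ihu, ihl]
    · have hx : pvCls x = none := by rw [pvCls_eq]; simp [hu, hl]
      refine ⟨?_, ?_, ?_⟩ <;>
        simp [hx, pvHasMixed, pvHasUp, pvHasLo, hu, hl, ihm, ihu, ihl]

theorem pvLabels_subset (items : List String) (x : String)
    (hx : x ∈ items.filterMap pvCls) : x = "upper" ∨ x = "lower" ∨ x = "mixed" := by
  obtain ⟨s, -, hs⟩ := List.mem_filterMap.1 hx
  rw [pvCls_eq] at hs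
  split_ifs at hs <;> simp_all

-- a Nodup nonempty list whose members all equal v is [v]
theorem pvSingleton_of_mem (S : List String) (v : String) (hnd : S.Nodup) (hne : S ≠ [])
    (hmem : ∀ x ∈ S, x = v) : S = [v] := by
  match S, hne with
  | x :: rest, _ =>
    have hx := hmem x (by simp)
    subst hx
    cases rest with
    | nil => rfl
    | cons y t =>
      have hy := hmem y (by simp)
      subst hy
      simp at hnd

-- ===== VERDICT (by name: the statement is the Claim_ definition above) =====
theorem detect_case_spec : Claim_equal_detect_case := by
  intro items _
  unfold Spec_detect_case detect_case detect_case_alt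
  rw [pvGo_spec]
  simp only [pvFoldl_eq_filterMap, List.nil_append]
  obtain ⟨hm_iff, hu_iff, hl_iff⟩ := pvMem_filterMap items
  by_cases hnil : items = []
  · subst hnil; simp [pvHasMixed, pvHasUp, pvHasLo, pvFin]
  · simp only [if_neg hnil]
    by_cases hm : pvHasMixed items = true
    · -- some item mixes cases: both sides return ("mixed", false)
      have hmem := hm_iff.2 hm
      have hLne : items.filterMap pvCls ≠ [] := by
        intro h; rw [h] at hmem; simp at hmem
      have hc : (PySem.Set.ofList (items.filterMap pvCls)).contains "mixed" = true := by
        rw [PySem.Set.contains_iff]; exact (PySem.Set.mem_ofList _ _).2 hmem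
      rw [if_neg hLne, if_pos hc, if_pos hm]
    · have hm' : "mixed" ∉ items.filterMap pvCls := fun h => hm (hm_iff.1 h)
      have hc : ¬ ((PySem.Set.ofList (items.filterMap pvCls)).contains "mixed" = true) := by
        rw [PySem.Set.contains_iff, PySem.Set.mem_ofList]; exact hm'
      rw [if_neg hm]
      by_cases hu : pvHasUp items = true <;> by_cases hl : pvHasLo items = true
      · -- upper and lower items both present: the set has two elements
        have hup : "upper" ∈ PySem.Set.ofList (items.filterMap pvCls) :=
          (PySem.Set.mem_ofList _ _).2 (hu_iff.2 hu)
        have hlo : "lower" ∈ PySem.Set.ofList (items.filterMap pvCls) :=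
          (PySem.Set.mem_ofList _ _).2 (hl_iff.2 hl)
        have hLne : items.filterMap pvCls ≠ [] := by
          intro h
          rw [h] at hup; simp [PySem.Set.ofList] at hup
        have hlen : ¬ ((PySem.Set.ofList (items.filterMap pvCls)).length = 1) := by
          intro h
          match hS : PySem.Set.ofList (items.filterMap pvCls), h with
          | [x], _ =>
            rw [hS] at hup hlo
            simp at hup hlo
            rw [← hup] at hlo
            exact absurd hlo (by decide)
        rw [if_neg hLne, if_neg hc, if_neg hlen]
        simp [pvFin, hu, hl]
      · -- only upper items: the set is exactly ["upper"]
        have hl' : "lower" ∉ items.filterMap pvCls := fun h => hl (hl_iff.1 h)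
        have hupL := hu_iff.2 hu
        have hLne : items.filterMap pvCls ≠ [] := by
          intro h; rw [h] at hupL; simp at hupL
        have hall : ∀ x ∈ PySem.Set.ofList (items.filterMap pvCls), x = "upper" := by
          intro x hx
          rw [PySem.Set.mem_ofList] at hx
          rcases pvLabels_subset items x hx with h | h | h
          · exact h
          · exact absurd (h ▸ hx) hl'
          · exact absurd (h ▸ hx) hm'
        have hSne : PySem.Set.ofList (items.filterMap pvCls) ≠ [] := by
          intro h
          have := (PySem.Set.mem_ofList (items.filterMap pvCls) "upper").2 hupL
          rw [h] at this; simp at this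
        have hS := pvSingleton_of_mem _ "upper" (PySem.Set.nodup_ofList _) hSne hall
        rw [if_neg hLne, hS]
        simp [pvFin, hu, hl]
      · -- only lower items: the set is exactly ["lower"]
        have hu' : "upper" ∉ items.filterMap pvCls := fun h => hu (hu_iff.1 h)
        have hloL := hl_iff.2 hl
        have hLne : items.filterMap pvCls ≠ [] := by
          intro h; rw [h] at hloL; simp at hloL
        have hall : ∀ x ∈ PySem.Set.ofList (items.filterMap pvCls), x = "lower" := by
          intro x hx
          rw [PySem.Set.mem_ofList] at hx
          rcases pvLabels_subset items x hx with h | h | h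
          · exact absurd (h ▸ hx) hu'
          · exact h
          · exact absurd (h ▸ hx) hm'
        have hSne : PySem.Set.ofList (items.filterMap pvCls) ≠ [] := by
          intro h
          have := (PySem.Set.mem_ofList (items.filterMap pvCls) "lower").2 hloL
          rw [h] at this; simp at this
        have hS := pvSingleton_of_mem _ "lower" (PySem.Set.nodup_ofList _) hSne hall
        rw [if_neg hLne, hS]
        simp [pvFin, hu, hl]
      · -- no item has any letters: the label list is empty
        have hL : items.filterMap pvCls = [] := by
          match hE : items.filterMap pvCls with
          | [] => rfl
          | x :: t =>
            have hxmem : x ∈ items.filterMap pvCls := by rw [hE]; simp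
            rcases pvLabels_subset items x hxmem with h | h | h
            · exact absurd (hu_iff.1 (h ▸ hxmem)) hu
            · exact absurd (hl_iff.1 (h ▸ hxmem)) hl
            · exact absurd (hm_iff.1 (h ▸ hxmem)) (by simp [hm])
        rw [if_pos hL]
        simp [pvFin, hu, hl]
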